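-- pv_equiv track=rewrite | github.com/dchaebae/icu_hypotheses | retain-keras/code_generator_evaluation_med1.py | visitize
-- ===== SOURCE A (Python) =====
-- def visitize(seq, termination):
--     patient = []
--     code_active = -1
--     visit = []
--     for i, code in enumerate(seq):
--         if i == len(seq)-1:
--             break
--         code_type = (int)(code/3)
--         if code_active >= code_type:
--             patient.append(visit)
--             visit = []
--
--         visit.append(code)
--         code_active = code_type
--
--     patient.append(visit)
--     if seq[-1] == termination[0]:
--         mort = 1
--     else:
--         mort = 0
--
--     return patient, mort
-- ===== SOURCE B (Python) =====
-- def visitize(seq, termination):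
--     body = seq[:-1]
--     types = [int(c / 3) for c in body]
--     cuts = [i for i in range(len(body)) if (types[i - 1] if i > 0 else -1) >= types[i]]
--     edges = [0] + cuts + [len(body)]
--     patient = [body[a:b] for a, b in zip(edges, edges[1:])]
--     mort = 1 if seq[-1] == termination[0] else 0
--     return patient, mort
-- ===== Notes on version B (the rewrite author's own statement) =====
-- stated objective: alternative
-- what changed: A streams codes one at a time into a growing current visit with a code_active accumulator; B first computes the visit-boundary indices (where the code type does not increase) in one comprehension and then builds each visit by slicing seq[:-1] between consecutive boundaries.
import Mathlib
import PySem

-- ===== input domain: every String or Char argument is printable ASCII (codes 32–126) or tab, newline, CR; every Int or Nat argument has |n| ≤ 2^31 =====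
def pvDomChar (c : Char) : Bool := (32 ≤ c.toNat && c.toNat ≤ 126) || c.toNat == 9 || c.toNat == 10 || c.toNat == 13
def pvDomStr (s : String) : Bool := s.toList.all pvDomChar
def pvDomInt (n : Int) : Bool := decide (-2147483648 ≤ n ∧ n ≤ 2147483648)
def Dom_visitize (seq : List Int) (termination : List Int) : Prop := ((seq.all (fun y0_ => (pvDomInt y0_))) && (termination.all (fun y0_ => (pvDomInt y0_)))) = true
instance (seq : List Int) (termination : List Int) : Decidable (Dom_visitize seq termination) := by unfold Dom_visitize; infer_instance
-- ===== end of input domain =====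

-- B re-implements the grouping by a different decomposition: compute all visit-boundary indices
-- first, then build the visits by slicing between consecutive boundaries (A streams one element at
-- a time into a growing current visit).  Same cost, 'alternative' objective; return values agree on
-- all inputs where A returns (seq and termination nonempty).

-- ===== PORT A =====
-- Python's 'break' fires only when i = len(seq)-1, i.e. on the last iteration, transliterated as
-- the first branch of the loop body.  int(code/3) on |code| ≤ 2^31 is exact truncating division.
def visitizeLoop (n : Nat) (i : Nat) (patient : List (List Int)) (codeActive : Int) (visit : List Int) :
    List Int → List (List Int) × Int × List Int
  | [] => (patient, codeActive, visit)
  | code :: rest =>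
    if i = n - 1 then (patient, codeActive, visit)
    else
      let codeType := PySem.Int.truncdiv code 3
      if codeActive ≥ codeType then
        visitizeLoop n (i + 1) (patient ++ [visit]) codeType [code] rest
      else
        visitizeLoop n (i + 1) patient codeType (visit ++ [code]) rest

def visitize (seq : List Int) (termination : List Int) : List (List Int) × Int :=
  let s := visitizeLoop seq.length 0 [] (-1) [] seq
  let patient := s.1 ++ [s.2.2]
  let mort : Int := if PySem.List.pyGet? seq (-1) = PySem.List.pyGet? termination 0 then 1 else 0
  (patient, mort)

-- ===== PORT B =====
def visitize_alt (seq : List Int) (termination : List Int) : List (List Int) × Int :=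
  let body := PySem.List.slice seq none (some (-1))                     -- seq[:-1]
  let types := body.map (fun c => PySem.Int.truncdiv c 3)
  let cuts := (PySem.List.pyRange 0 (body.length : Int) 1).filter
      (fun i => decide ((if 0 < i then PySem.List.pyGetD types (i - 1) 0 else -1) ≥
                        PySem.List.pyGetD types i 0))
  let edges := 0 :: cuts ++ [(body.length : Int)]
  let patient := (edges.zip edges.tail).map (fun p => PySem.List.slice body (some p.1) (some p.2))
  let mort : Int := if PySem.List.pyGet? seq (-1) = PySem.List.pyGet? termination 0 then 1 else 0
  (patient, mort)

-- ===== PRECONDITION & SPEC =====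
-- Python A evaluates seq[-1] and termination[0]: it raises IndexError when seq or termination is
-- empty (B raises there too); exactly those inputs are excluded.
def Pre_visitize (seq : List Int) (termination : List Int) : Prop := seq ≠ [] ∧ termination ≠ []
instance (seq : List Int) (termination : List Int) : Decidable (Pre_visitize seq termination) := by
  unfold Pre_visitize; infer_instance
def pvWitness_visitize : List Int × List Int := ([4, 5, 2, 9], [9])

def Spec_visitize (seq : List Int) (termination : List Int) (out : List (List Int) × Int) : Prop := out = visitize_alt seq termination
instance (seq : List Int) (termination : List Int) (out : List (List Int) × Int) : Decidable (Spec_visitize seq termination out) := by unfold Spec_visitize; infer_instance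

-- ===== CLAIM (what is proved, stated in full; the proofs are below) =====
def Claim_equal_visitize : Prop := ∀ (seq : List Int) (termination : List Int), Dom_visitize seq termination → Pre_visitize seq termination → Spec_visitize seq termination (visitize seq termination)

-- ===== LEMMAS AND PROOFS =====

-- The per-visit functional content of A's loop: current code_active a, current visit v.
def hvis (a : Int) (v : List Int) : List Int → List (List Int)
  | [] => [v]
  | c :: l =>
    if a ≥ PySem.Int.truncdiv c 3 then v :: hvis (PySem.Int.truncdiv c 3) [c] l
    else hvis (PySem.Int.truncdiv c 3) (v ++ [c]) l

-- Accumulator-free grouping both sides are reduced to.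
def grpSpec (a : Int) : List Int → List (List Int)
  | [] => [[]]
  | c :: l =>
    if a ≥ PySem.Int.truncdiv c 3 then [] :: (grpSpec (PySem.Int.truncdiv c 3) l).modifyHead (c :: ·)
    else (grpSpec (PySem.Int.truncdiv c 3) l).modifyHead (c :: ·)

-- B's cut list / grouping generalised over the initial previous-type value.
def cutsB (a : Int) (body : List Int) : List Int :=
  (PySem.List.pyRange 0 (body.length : Int) 1).filter
    (fun i => decide ((if 0 < i then PySem.List.pyGetD (body.map fun c => PySem.Int.truncdiv c 3) (i - 1) 0 else a) ≥
                      PySem.List.pyGetD (body.map fun c => PySem.Int.truncdiv c 3) i 0))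

def grp (body : List Int) (es : List Int) : List (List Int) :=
  (es.zip es.tail).map (fun p => PySem.List.slice body (some p.1) (some p.2))

def grpB (a : Int) (body : List Int) : List (List Int) :=
  grp body (0 :: cutsB a body ++ [(body.length : Int)])

lemma loopA_spec : ∀ (l : List Int) (x : Int) (n i : Nat) (p : List (List Int)) (a : Int) (v : List Int),
    n = i + l.length + 1 →
    (visitizeLoop n i p a v (l ++ [x])).1 ++ [(visitizeLoop n i p a v (l ++ [x])).2.2] = p ++ hvis a v l := by
  intro l
  induction l with
  | nil =>
    intro x n i p a v hn
    subst hn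
    simp [visitizeLoop, hvis]
  | cons c l ih =>
    intro x n i p a v hn
    have hne : i ≠ n - 1 := by simp at hn; omega
    by_cases hc : a ≥ PySem.Int.truncdiv c 3
    · simp only [List.cons_append, visitizeLoop, hne, if_false, hc, if_true, hvis]
      rw [ih x n (i+1) _ _ _ (by simp at hn ⊢; omega)]
      simp
    · simp only [List.cons_append, visitizeLoop, hne, if_false, hvis, if_neg hc]
      rw [ih x n (i+1) _ _ _ (by simp at hn ⊢; omega)]

lemma hvis_grpSpec : ∀ (l : List Int) (a : Int) (v : List Int),
    hvis a v l = (grpSpec a l).modifyHead (v ++ ·) := by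
  intro l
  induction l with
  | nil => intro a v; simp [hvis, grpSpec]
  | cons c l ih =>
    intro a v
    by_cases hc : a ≥ PySem.Int.truncdiv c 3
    · simp only [hvis, grpSpec, if_pos hc, List.modifyHead_cons, ih]
      simp
    · simp only [hvis, grpSpec, if_neg hc, ih, List.modifyHead_modifyHead]
      congr 1; funext x; simp

lemma cutsB_nil (a : Int) : cutsB a [] = [] := by
  simp [cutsB]

lemma cutsB_cons (a c : Int) (l : List Int) :
    cutsB a (c :: l) =
      (if a ≥ PySem.Int.truncdiv c 3 then [(0 : Int)] else []) ++ (cutsB (PySem.Int.truncdiv c 3) l).map (· + 1) := by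
  simp only [cutsB, PySem.List.pyRange_one, List.filter_map, List.map_map]
  have hlen : (((c :: l).length : Int) - 0).toNat = l.length + 1 := by simp
  have hlen' : (((l.length : Nat) : Int) - 0).toNat = l.length := by simp
  rw [hlen, hlen', List.range_succ_eq_map, List.filter_cons, List.filter_map]
  have hfun :
      ((fun i => decide ((if 0 < i then PySem.List.pyGetD ((c :: l).map fun c => PySem.Int.truncdiv c 3) (i - 1) 0 else a) ≥
                      PySem.List.pyGetD ((c :: l).map fun c => PySem.Int.truncdiv c 3) i 0)) ∘
        (fun k : Nat => (0:Int) + (k:Int))) ∘ Nat.succ =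
      ((fun i => decide ((if 0 < i then PySem.List.pyGetD (l.map fun c => PySem.Int.truncdiv c 3) (i - 1) 0 else PySem.Int.truncdiv c 3) ≥
                      PySem.List.pyGetD (l.map fun c => PySem.Int.truncdiv c 3) i 0)) ∘
        (fun k : Nat => (0:Int) + (k:Int))) := by
    funext k
    simp only [Function.comp]
    rw [decide_eq_decide]
    have hp : (0:Int) < 0 + ((Nat.succ k : Nat) : Int) := by positivity
    rw [if_pos hp]
    have e1 : (0:Int) + ((Nat.succ k : Nat) : Int) - 1 = ((k : Nat) : Int) := by push_cast; ring
    have e2 : (0:Int) + ((Nat.succ k : Nat) : Int) = ((k + 1 : Nat) : Int) := by push_cast; ring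
    rw [e1, e2]
    simp only [PySem.List.pyGetD_natCast, List.map_cons, List.getD_cons_succ]
    cases k with
    | zero =>
      have hz : ¬ ((0:Int) < 0 + ((0:Nat):Int)) := by simp
      rw [if_neg hz]
      have e3 : (0:Int) + ((0:Nat):Int) = ((0:Nat):Int) := by simp
      rw [e3]
      simp only [PySem.List.pyGetD_natCast, List.getD_cons_zero]
    | succ m =>
      have hp2 : (0:Int) < 0 + ((Nat.succ m : Nat) : Int) := by positivity
      rw [if_pos hp2]
      have e4 : (0:Int) + ((Nat.succ m : Nat) : Int) - 1 = ((m : Nat) : Int) := by push_cast; ring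
      have e5 : (0:Int) + ((Nat.succ m : Nat) : Int) = ((m + 1 : Nat) : Int) := by push_cast; ring
      rw [e4, e5]
      simp only [PySem.List.pyGetD_natCast, List.getD_cons_succ]
  rw [hfun]
  have hP0 : (((fun i => decide ((if 0 < i then PySem.List.pyGetD ((c :: l).map fun c => PySem.Int.truncdiv c 3) (i - 1) 0 else a) ≥
                      PySem.List.pyGetD ((c :: l).map fun c => PySem.Int.truncdiv c 3) i 0)) ∘
        (fun k : Nat => (0:Int) + (k:Int))) 0) = decide (a ≥ PySem.Int.truncdiv c 3) := by
    simp only [Function.comp_apply]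
    have hz0 : (0:Int) + ((0:Nat):Int) = ((0:Nat):Int) := by simp
    rw [hz0, if_neg (by simp)]
    simp only [PySem.List.pyGetD_natCast, List.map_cons, List.getD_cons_zero]
  rw [hP0]
  have hmap2 : ∀ Y : List Nat, List.map (fun k : Nat => (0:Int) + (k:Int)) (List.map Nat.succ Y) =
      List.map (fun x : Int => x + 1) (List.map (fun k : Nat => (0:Int) + (k:Int)) Y) := by
    intro Y
    simp only [List.map_map]
    apply List.map_congr_left
    intro k _
    simp only [Function.comp_apply]
    push_cast
    ring
  by_cases hc : a ≥ PySem.Int.truncdiv c 3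
  · rw [if_pos (by exact decide_eq_true hc), if_pos hc]
    simp only [List.map_cons, hmap2, List.cons_append, List.nil_append, List.map_map]
    congr 1

  · rw [if_neg (by simp [hc]), if_neg hc]
    simp only [hmap2, List.nil_append, List.map_map]


lemma mem_cutsB_nonneg (a : Int) (body : List Int) : ∀ e ∈ cutsB a body, 0 ≤ e := by
  intro e he
  have hm := List.mem_of_mem_filter he
  rw [PySem.List.mem_pyRange_one] at hm
  exact hm.1

lemma slice_cons_succ (c x y : Int) (body : List Int) (hx : 0 ≤ x) (hy : 0 ≤ y) :
    PySem.List.slice (c :: body) (some (x + 1)) (some (y + 1)) = PySem.List.slice body (some x) (some y) := by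
  rw [PySem.List.slice_toNat _ (by omega) (by omega), PySem.List.slice_toNat _ hx hy]
  have h1 : (x + 1).toNat = x.toNat + 1 := by omega
  have h2 : (y + 1).toNat - (x.toNat + 1) = y.toNat - x.toNat := by omega
  rw [h1, h2, List.drop_succ_cons]

lemma slice_zero_succ (c y : Int) (body : List Int) (hy : 0 ≤ y) :
    PySem.List.slice (c :: body) (some 0) (some (y + 1)) = c :: PySem.List.slice body (some 0) (some y) := by
  rw [PySem.List.slice_toNat _ (by omega) (by omega), PySem.List.slice_toNat _ le_rfl hy]
  have h1 : (y + 1).toNat = y.toNat + 1 := by omega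
  simp [h1]

lemma grp_shift : ∀ (es : List Int) (c : Int) (body : List Int), (∀ e ∈ es, 0 ≤ e) →
    grp (c :: body) (es.map (· + 1)) = grp body es := by
  intro es
  induction es with
  | nil => intro c body _; rfl
  | cons x rest ih =>
    intro c body h
    cases rest with
    | nil => rfl
    | cons y rest' =>
      have hx : 0 ≤ x := h x (by simp)
      have hy : 0 ≤ y := h y (by simp)
      have hL : grp (c :: body) (((x :: y :: rest').map (· + 1))) =
          PySem.List.slice (c :: body) (some (x + 1)) (some (y + 1)) ::
            grp (c :: body) ((y :: rest').map (· + 1)) := rfl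
      have hR : grp body (x :: y :: rest') =
          PySem.List.slice body (some x) (some y) :: grp body (y :: rest') := rfl
      rw [hL, hR, slice_cons_succ c x y body hx hy,
        ih c body (fun e he => h e (List.mem_cons_of_mem _ he))]

lemma grp_head_shift (c : Int) (body : List Int) (es : List Int) (h : ∀ e ∈ es, 0 ≤ e) :
    grp (c :: body) (0 :: es.map (· + 1)) = (grp body (0 :: es)).modifyHead (c :: ·) := by
  cases es with
  | nil => rfl
  | cons e rest =>
    have he : 0 ≤ e := h e (by simp)
    have h1 : grp (c :: body) (0 :: (e + 1) :: rest.map (· + 1)) =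
        PySem.List.slice (c :: body) (some 0) (some (e + 1)) :: grp (c :: body) ((e :: rest).map (· + 1)) := rfl
    rw [List.map_cons, h1, grp_shift _ _ _ h, slice_zero_succ _ _ _ he]
    rfl

lemma grpB_grpSpec : ∀ (body : List Int) (a : Int), grpB a body = grpSpec a body := by
  intro body
  induction body with
  | nil =>
    intro a
    simp [grpB, cutsB_nil, grp, grpSpec, PySem.List.slice]
  | cons c l ih =>
    intro a
    have hnn : ∀ e ∈ cutsB (PySem.Int.truncdiv c 3) l ++ [(l.length : Int)], 0 ≤ e := by
      intro e he
      rcases List.mem_append.mp he with h | h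
      · exact mem_cutsB_nonneg _ _ e h
      · simp at h; omega
    have hlen : (((c :: l).length : Nat) : Int) = ((l.length : Int) + 1) := by push_cast [List.length_cons]; ring
    have hmap : (cutsB (PySem.Int.truncdiv c 3) l).map (· + 1) ++ [(l.length : Int) + 1] =
        ((cutsB (PySem.Int.truncdiv c 3) l) ++ [(l.length : Int)]).map (· + 1) := by
      simp
    by_cases hc : a ≥ PySem.Int.truncdiv c 3
    · have : grpB a (c :: l) = grp (c :: l)
          (0 :: 0 :: ((cutsB (PySem.Int.truncdiv c 3) l ++ [(l.length : Int)]).map (· + 1))) := by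
        rw [grpB, cutsB_cons, if_pos hc, hlen]
        simp only [List.cons_append, List.nil_append]
        rw [hmap]
      rw [this]
      have h2 : grp (c :: l) (0 :: 0 :: ((cutsB (PySem.Int.truncdiv c 3) l ++ [(l.length : Int)]).map (· + 1))) =
          PySem.List.slice (c :: l) (some 0) (some 0) ::
            grp (c :: l) (0 :: ((cutsB (PySem.Int.truncdiv c 3) l ++ [(l.length : Int)]).map (· + 1))) := rfl
      rw [h2, grp_head_shift _ _ _ hnn]
      have h3 : PySem.List.slice (c :: l) (some 0) (some 0) = ([] : List Int) := by
        rw [PySem.List.slice_toNat _ le_rfl le_rfl]; simp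
      rw [h3]
      have h4 : grp l (0 :: (cutsB (PySem.Int.truncdiv c 3) l ++ [(l.length : Int)])) = grpB (PySem.Int.truncdiv c 3) l := rfl
      rw [h4, ih, grpSpec, if_pos hc]
    · have : grpB a (c :: l) = grp (c :: l)
          (0 :: ((cutsB (PySem.Int.truncdiv c 3) l ++ [(l.length : Int)]).map (· + 1))) := by
        rw [grpB, cutsB_cons, if_neg hc, hlen]
        simp only [List.nil_append, List.cons_append]
        rw [hmap]
      rw [this, grp_head_shift _ _ _ hnn]
      have h4 : grp l (0 :: (cutsB (PySem.Int.truncdiv c 3) l ++ [(l.length : Int)])) = grpB (PySem.Int.truncdiv c 3) l := rfl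
      rw [h4, ih, grpSpec, if_neg hc]

-- ===== VERDICT (by name: the statement is the Claim_ definition above) =====
theorem visitize_spec : Claim_equal_visitize := by
  intro seq term _ hpre
  unfold Spec_visitize
  obtain ⟨hseq, -⟩ := hpre
  have hA1 : (visitize seq term).1 = hvis (-1) [] seq.dropLast := by
    have hn : seq.length = 0 + seq.dropLast.length + 1 := by
      have := List.length_dropLast (xs := seq)
      have hpos : 0 < seq.length := List.length_pos_iff.mpr hseq
      omega
    have := loopA_spec seq.dropLast (seq.getLast hseq) seq.length 0 [] (-1) [] hn
    rw [List.dropLast_append_getLast hseq] at this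
    simpa [visitize] using this
  have hB1 : (visitize_alt seq term).1 = grpB (-1) seq.dropLast := by
    simp only [visitize_alt, grpB, cutsB, grp, PySem.List.slice_to_neg_one]
  have hmort : (visitize seq term).2 = (visitize_alt seq term).2 := rfl
  have h1 : (visitize seq term).1 = (visitize_alt seq term).1 := by
    rw [hA1, hB1, grpB_grpSpec, hvis_grpSpec]
    have : (fun x : List Int => [] ++ x) = id := by funext x; simp
    rw [this, List.modifyHead_id]
    rfl
  exact Prod.ext h1 hmort
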